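-- pv_equiv track=rewrite | github.com/shohatl/mmoproject | Testing/brout force.py | last_is_z
-- ===== SOURCE A (Python) =====
-- def last_is_z(strForAdd):
--     if len(strForAdd) == 1:
--         return 'aa'
--     index = -2
--     while True:
--         if index * -1 > len(strForAdd):
--             t = 'a'
--             for i in range(len(strForAdd)):
--                 t += 'a'
--             return t
--         if strForAdd[index] != 'z':
--             t = strForAdd[:index] + chr(ord(strForAdd[index]) + 1)
--             index *= -1
--             index -= 1
--             for i in range(index):
--                 t += 'a'
--             return t
--         else:
--             index -= 1
-- ===== SOURCE B (Python) =====
-- def _bump(head):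
--     """Odometer increment of head via recursive carry propagation.
--     Returns the incremented string, or None when the carry falls off the top."""
--     if not head:
--         return None
--     last = head[-1]
--     if last != 'z':
--         return head[:-1] + chr(ord(last) + 1)
--     carried = _bump(head[:-1])
--     return None if carried is None else carried + 'a'
--
-- def last_is_z(strForAdd):
--     carried = _bump(strForAdd[:-1])
--     if carried is None:
--         return 'a' * (len(strForAdd) + 1)
--     return carried + 'a'
-- ===== Notes on version B (the rewrite author's own statement) =====
-- stated objective: alternative
-- what changed: Replaces A's index-walking while-loop (find the rightmost non-'z', then slice and pad with a counted run of 'a's) with a recursive odometer carry: _bump increments the last character and propagates the carry through the recursion, rebuilding the string on the way out, with None signalling overflow.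
import Mathlib
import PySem

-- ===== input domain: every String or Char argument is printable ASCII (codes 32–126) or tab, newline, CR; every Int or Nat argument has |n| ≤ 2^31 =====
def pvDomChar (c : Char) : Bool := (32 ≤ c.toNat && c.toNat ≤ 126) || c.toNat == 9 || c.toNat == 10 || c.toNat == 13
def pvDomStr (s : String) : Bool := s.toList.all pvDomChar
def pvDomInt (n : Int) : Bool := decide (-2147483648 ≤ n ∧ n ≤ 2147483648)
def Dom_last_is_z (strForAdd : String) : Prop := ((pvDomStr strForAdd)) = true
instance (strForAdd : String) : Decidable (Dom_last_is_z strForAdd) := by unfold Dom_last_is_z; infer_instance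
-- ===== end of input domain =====

-- B replaces A's index-walking while-loop by a recursive odometer carry (alternative decomposition).

-- ===== PORT A =====
-- A's while-loop; Python's negative index -k is tracked as the Nat k ≥ 2
-- (the loop only reads strForAdd[-k] after checking k ≤ len, so getD's default is never used).
def lastIsZLoop (cs : List Char) (k : Nat) : List Char :=
  if cs.length < k then
    -- t = 'a'; for i in range(len(strForAdd)): t += 'a'
    (List.range cs.length).foldl (fun t _ => t ++ ['a']) ['a']
  else
    let c := cs.getD (cs.length - k) ' '
    if c ≠ 'z' then
      -- t = strForAdd[:index] + chr(ord(strForAdd[index]) + 1); then append (k-1) 'a's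
      (List.range (k - 1)).foldl (fun t _ => t ++ ['a'])
        (cs.take (cs.length - k) ++ [Char.ofNat (c.toNat + 1)])
    else
      lastIsZLoop cs (k + 1)
termination_by cs.length + 1 - k

def last_is_z (strForAdd : String) : String :=
  if strForAdd.toList.length == 1 then "aa"
  else String.ofList (lastIsZLoop strForAdd.toList 2)

-- ===== PORT B =====
-- _bump: recursive odometer carry on the last character; none = carry out of the top
def bump (cs : List Char) : Option (List Char) :=
  if hnil : cs = [] then none
  else
    let last := cs.getLastD ' '
    if last ≠ 'z' then some (cs.dropLast ++ [Char.ofNat (last.toNat + 1)])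
    else (bump cs.dropLast).map (fun r => r ++ ['a'])
termination_by cs.length
decreasing_by
  have : cs.length ≠ 0 := fun hn => hnil (List.length_eq_zero_iff.mp hn)
  simp [List.length_dropLast]; omega

def last_is_z_alt (strForAdd : String) : String :=
  match bump strForAdd.toList.dropLast with
  | none => String.ofList (List.replicate (strForAdd.toList.length + 1) 'a')
  | some r => String.ofList (r ++ ['a'])

-- ===== PRECONDITION & SPEC =====
def Spec_last_is_z (strForAdd : String) (out : String) : Prop := out = last_is_z_alt strForAdd
instance (strForAdd : String) (out : String) : Decidable (Spec_last_is_z strForAdd out) := by unfold Spec_last_is_z; infer_instance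

-- ===== CLAIM (what is proved, stated in full; the proofs are below) =====
def Claim_equal_last_is_z : Prop := ∀ (strForAdd : String), Dom_last_is_z strForAdd → Spec_last_is_z strForAdd (last_is_z strForAdd)

-- ===== LEMMAS AND PROOFS =====
-- common characterisation, phrased on the reversed head (proof-side helper)
def reconstruct (n : Nat) (r : List Char) : List Char :=
  match r.dropWhile (· == 'z') with
  | [] => List.replicate (n + 1) 'a'
  | c :: rest => rest.reverse ++ [Char.ofNat (c.toNat + 1)] ++ List.replicate (n - (rest.length + 1)) 'a'

theorem foldl_append_a (n : Nat) (t : List Char) :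
    (List.range n).foldl (fun t _ => t ++ ['a']) t = t ++ List.replicate n 'a' := by
  induction n generalizing t with
  | zero => simp
  | succ m ih => simp [List.range_succ, ih, List.replicate_succ']

theorem reconstruct_cons_z (n : Nat) (rest : List Char) :
    reconstruct n ('z' :: rest) = reconstruct n rest := by
  unfold reconstruct
  rw [List.dropWhile_cons_of_pos (by simp)]

theorem reconstruct_cons_of_ne (n : Nat) (c : Char) (rest : List Char) (h : ¬ c = 'z') :
    reconstruct n (c :: rest) = rest.reverse ++ [Char.ofNat (c.toNat + 1)]
      ++ List.replicate (n - (rest.length + 1)) 'a' := by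
  unfold reconstruct
  rw [List.dropWhile_cons_of_neg (by simpa using h)]

theorem loop_base (cs : List Char) (k : Nat) (hk : 2 ≤ k) (h1 : cs.length < k) :
    lastIsZLoop cs k = reconstruct cs.length (cs.dropLast.reverse.drop (k - 2)) := by
  have h2 : cs.dropLast.reverse.drop (k - 2) = [] := by
    apply List.drop_eq_nil_of_le
    simp only [List.length_reverse, List.length_dropLast]
    omega
  rw [lastIsZLoop, if_pos h1, h2]
  simp [reconstruct, List.replicate_succ]

theorem loop_eq (cs : List Char) (m k : Nat) (hk : 2 ≤ k) (hm : cs.length + 2 - k ≤ m) :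
    lastIsZLoop cs k = reconstruct cs.length (cs.dropLast.reverse.drop (k - 2)) := by
  induction m generalizing k with
  | zero => exact loop_base cs k hk (by omega)
  | succ m ih =>
    by_cases h1 : cs.length < k
    · exact loop_base cs k hk h1
    · rw [Nat.not_lt] at h1
      have hlt : k - 2 < cs.dropLast.reverse.length := by
        simp only [List.length_reverse, List.length_dropLast]; omega
      have hidx : cs.length - k < cs.length := by omega
      have hdrop : cs.dropLast.reverse.drop (k - 2)
          = cs.getD (cs.length - k) ' ' :: cs.dropLast.reverse.drop (k - 1) := by
        rw [List.drop_eq_getElem_cons hlt]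
        have hhead : cs.dropLast.reverse[k - 2]'hlt = cs.getD (cs.length - k) ' ' := by
          simp only [List.getElem_reverse, List.getElem_dropLast,
            List.getD_eq_getElem cs ' ' hidx, List.length_dropLast]
          congr 1
          omega
        rw [hhead, show k - 2 + 1 = k - 1 from by omega]
      rw [lastIsZLoop, if_neg (by omega), hdrop]
      by_cases hz : cs.getD (cs.length - k) ' ' = 'z'
      · rw [if_neg (by simpa using hz), hz, reconstruct_cons_z]
        have harg : k + 1 - 2 = k - 1 := by omega
        have := ih (k + 1) (by omega) (by omega)
        rw [harg] at this
        exact this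
      · rw [if_pos hz, reconstruct_cons_of_ne _ _ _ hz, foldl_append_a]
        have hrev : (cs.dropLast.reverse.drop (k - 1)).reverse = cs.take (cs.length - k) := by
          rw [List.drop_reverse, List.reverse_reverse, List.dropLast_eq_take, List.take_take]
          congr 1
          simp only [List.length_take]
          omega
        have hlen : (cs.dropLast.reverse.drop (k - 1)).length = cs.length - k := by
          simp only [List.length_drop, List.length_reverse, List.length_dropLast]; omega
        rw [hrev, hlen, show cs.length - (cs.length - k + 1) = k - 1 by omega]

-- B side: bump on a reversed list, characterised by dropWhile
theorem bump_rev (r : List Char) :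
    bump r.reverse =
      match r.dropWhile (· == 'z') with
      | [] => none
      | c :: rest => some (rest.reverse ++ [Char.ofNat (c.toNat + 1)]
          ++ List.replicate (r.length - rest.length - 1) 'a') := by
  induction r with
  | nil => simp [bump]
  | cons c rest0 ih =>
    rw [List.reverse_cons, bump]
    have hne : rest0.reverse ++ [c] ≠ [] := by simp
    rw [dif_neg hne]
    simp only [List.getLastD_concat, List.dropLast_concat]
    by_cases hz : c = 'z'
    · subst hz
      rw [if_neg (by simp), ih]
      cases hdw : rest0.dropWhile (· == 'z') with
      | nil => simp [List.dropWhile_cons_of_pos, hdw]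
      | cons c' rest' =>
        have hlen : rest'.length + 1 ≤ rest0.length := by
          have := List.length_dropWhile_le (· == 'z') rest0
          rw [hdw] at this; simpa using this
        have hdw2 : List.dropWhile (fun x => x == 'z') ('z' :: rest0) = c' :: rest' := by
          rw [List.dropWhile_cons_of_pos (by simp), hdw]
        simp only [hdw2, Option.map_some]
        rw [show ('z' :: rest0).length - rest'.length - 1 = (rest0.length - rest'.length - 1) + 1
          from by simp; omega]
        simp [List.replicate_succ']
    · rw [if_pos (by simpa using hz), List.dropWhile_cons_of_neg (by simpa using hz)]
      simp

theorem alt_eq (strForAdd : String) :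
    last_is_z_alt strForAdd
      = String.ofList (reconstruct strForAdd.toList.length strForAdd.toList.dropLast.reverse) := by
  unfold last_is_z_alt reconstruct
  have hb := bump_rev strForAdd.toList.dropLast.reverse
  rw [List.reverse_reverse] at hb
  rw [hb]
  cases hdw : (strForAdd.toList.dropLast.reverse).dropWhile (· == 'z') with
  | nil => simp
  | cons c rest =>
    have hlen : rest.length + 1 ≤ strForAdd.toList.length - 1 := by
      have := List.length_dropWhile_le (· == 'z') strForAdd.toList.dropLast.reverse
      rw [hdw] at this
      simp only [List.length_cons, List.length_reverse, List.length_dropLast] at this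
      omega
    simp only
    rw [show strForAdd.toList.dropLast.reverse.length - rest.length - 1
        = strForAdd.toList.length - 1 - rest.length - 1 from by
      simp [List.length_reverse, List.length_dropLast]]
    rw [show strForAdd.toList.length - (rest.length + 1)
        = (strForAdd.toList.length - 1 - rest.length - 1) + 1 from by omega]
    simp [List.replicate_succ']

-- ===== VERDICT (by name: the statement is the Claim_ definition above) =====
theorem last_is_z_spec : Claim_equal_last_is_z := by
  intro s _
  unfold Spec_last_is_z last_is_z
  by_cases h1 : s.toList.length = 1
  · obtain ⟨a, ha⟩ := List.length_eq_one_iff.mp h1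
    rw [alt_eq, ha]
    simp [reconstruct, List.replicate]
  · rw [if_neg (by simpa using h1), alt_eq,
      loop_eq s.toList (s.toList.length) 2 (by omega) (by omega)]
    simp
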